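-- pv_equiv track=rewrite | github.com/mahmudhera/seqfeaturizer_py | src/seqfeaturizer/features/fimo.py | _find_max_window
-- ===== SOURCE A (Python) =====
-- from typing import Dict, Iterable, List, Optional, Sequence, Tuple
--
-- def _find_max_window(starts: List[int], window: int) -> int:
--     """Max number of motif start positions within any [pos, pos+window] interval."""
--     if not starts:
--         return 0
--     starts = sorted(starts)
--     m = 0
--     j = 0
--     for i in range(len(starts)):
--         while j < len(starts) and starts[j] <= starts[i] + window:
--             j += 1
--         # interval includes i..(j-1)
--         m = max(m, j - i)
--     return m
-- ===== SOURCE B (Python) =====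
-- def _find_max_window(starts, window):
--     """Max number of motif start positions within any [pos, pos+window] interval."""
--     s = sorted(starts)
--     n = len(s)
--     best = 0
--     for i in range(n):
--         t = s[i] + window
--         # binary search: first index lo with s[lo] > t  (== bisect_right(s, t))
--         lo, hi = 0, n
--         while lo < hi:
--             mid = (lo + hi) // 2
--             if s[mid] <= t:
--                 lo = mid + 1
--             else:
--                 hi = mid
--         if lo - i > best:
--             best = lo - i
--     return best
-- ===== Notes on version B (the rewrite author's own statement) =====
-- stated objective: alternative
-- what changed: Replaces the monotone shared two-pointer sweep (a j pointer advanced by an inner while loop across iterations) with an independent binary search per element for the first start exceeding starts[i]+window, keeping only a running maximum.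
import Mathlib
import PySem

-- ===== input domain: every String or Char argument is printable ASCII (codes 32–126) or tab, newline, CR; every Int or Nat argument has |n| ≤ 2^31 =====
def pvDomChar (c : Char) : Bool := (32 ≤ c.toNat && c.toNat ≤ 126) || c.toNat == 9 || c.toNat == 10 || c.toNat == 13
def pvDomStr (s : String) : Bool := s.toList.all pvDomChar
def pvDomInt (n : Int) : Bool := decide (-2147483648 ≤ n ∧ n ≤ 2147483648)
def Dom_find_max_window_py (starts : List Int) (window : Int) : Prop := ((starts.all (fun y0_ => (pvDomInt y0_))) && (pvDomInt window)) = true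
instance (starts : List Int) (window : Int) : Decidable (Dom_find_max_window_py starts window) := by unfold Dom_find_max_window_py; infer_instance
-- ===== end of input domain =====

-- B replaces A's shared monotone two-pointer sweep with an independent binary search per
-- element, keeping only a running maximum (objective: alternative algorithm, same cost class).

-- ===== PORT A =====
-- inner loop: 'while j < len(starts) and starts[j] <= starts[i] + window: j += 1'
-- fuel = s.length bounds the remaining iterations (j increases towards s.length)
def pvAdvanceA (s : List Int) (t : Int) : Nat → Nat → Nat
  | 0, j => j
  | fuel + 1, j =>
    if h : j < s.length then
      if s[j] ≤ t then pvAdvanceA s t fuel (j + 1) else j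
    else j

def find_max_window_py (starts : List Int) (window : Int) : Int :=
  if starts = [] then 0
  else
    let s := PySem.List.sorted starts (fun x => x)
    ((PySem.List.pyRange 0 (s.length : Int) 1).foldl
      (fun (st : Int × Nat) i =>
        let j := pvAdvanceA s (PySem.List.pyGetD s i 0 + window) s.length st.2
        (max st.1 ((j : Int) - i), j)) (0, 0)).1

-- ===== PORT B =====
-- hand-rolled bisect_right from Source B: first index lo with s[lo] > t
-- fuel = hi - lo at the first call bounds the iterations (the gap shrinks every step)
def pvBisectRight (s : List Int) (t : Int) : Nat → Nat → Nat → Nat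
  | 0, lo, _ => lo
  | fuel + 1, lo, hi =>
    if lo < hi then
      let mid := (lo + hi) / 2
      if s.getD mid 0 ≤ t then pvBisectRight s t fuel (mid + 1) hi
      else pvBisectRight s t fuel lo mid
    else lo

def find_max_window_py_alt (starts : List Int) (window : Int) : Int :=
  let s := PySem.List.sorted starts (fun x => x)
  (PySem.List.pyRange 0 (s.length : Int) 1).foldl
    (fun best i =>
      let lo := pvBisectRight s (PySem.List.pyGetD s i 0 + window) s.length 0 s.length
      if (lo : Int) - i > best then (lo : Int) - i else best) 0

-- ===== PRECONDITION & SPEC =====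
def Spec_find_max_window_py (starts : List Int) (window : Int) (out : Int) : Prop := out = find_max_window_py_alt starts window
instance (starts : List Int) (window : Int) (out : Int) : Decidable (Spec_find_max_window_py starts window out) := by unfold Spec_find_max_window_py; infer_instance

-- ===== CLAIM (what is proved, stated in full; the proofs are below) =====
def Claim_equal_find_max_window_py : Prop := ∀ (starts : List Int) (window : Int), Dom_find_max_window_py starts window → Spec_find_max_window_py starts window (find_max_window_py starts window)

-- ===== LEMMAS AND PROOFS =====

/-- Number of elements in the prefix of `s` that are `≤ t` (the split point of a sorted list). -/
def splitPt : List Int → Int → Nat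
  | [], _ => 0
  | a :: s, t => if a ≤ t then splitPt s t + 1 else 0

theorem splitPt_le_length (s : List Int) (t : Int) : splitPt s t ≤ s.length := by
  induction s with
  | nil => simp [splitPt]
  | cons a s ih => simp only [splitPt, List.length_cons]; split <;> omega

theorem lt_splitPt_iff (s : List Int) (t : Int) (hs : s.Pairwise (· ≤ ·))
    (k : Nat) (hk : k < s.length) : k < splitPt s t ↔ s[k] ≤ t := by
  induction s generalizing k with
  | nil => simp at hk
  | cons a s ih =>
    rcases List.pairwise_cons.mp hs with ⟨ha, hs'⟩
    cases k with
    | zero =>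
      simp only [splitPt, List.getElem_cons_zero]
      split <;> rename_i h <;> omega
    | succ k =>
      simp only [splitPt, List.getElem_cons_succ]
      have hk' : k < s.length := by simpa using hk
      split <;> rename_i h
      · have := ih hs' k hk'; omega
      · constructor
        · omega
        · intro hkt
          exact absurd (le_trans (ha _ (s.getElem_mem hk')) hkt) h

theorem splitPt_mono (s : List Int) {t t' : Int} (h : t ≤ t') :
    splitPt s t ≤ splitPt s t' := by
  induction s with
  | nil => simp [splitPt]
  | cons a s ih =>
    simp only [splitPt]
    split <;> rename_i h1
    · rw [if_pos (le_trans h1 h)]; omega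
    · omega

theorem pvAdvanceA_eq (s : List Int) (t : Int) (hs : s.Pairwise (· ≤ ·)) :
    ∀ (fuel j : Nat), s.length - j ≤ fuel → j ≤ splitPt s t →
      pvAdvanceA s t fuel j = splitPt s t := by
  have hP := splitPt_le_length s t
  intro fuel
  induction fuel with
  | zero => intro j hf hj; simp only [pvAdvanceA]; omega
  | succ fuel ih =>
    intro j hf hj
    simp only [pvAdvanceA]
    split <;> rename_i h
    · split <;> rename_i h2
      · exact ih (j + 1) (by omega) ((lt_splitPt_iff s t hs j h).mpr h2)
      · have := (lt_splitPt_iff s t hs j h).mp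
        by_contra hne
        exact h2 (this (by omega))
    · omega

theorem pvBisectRight_eq (s : List Int) (t : Int) (hs : s.Pairwise (· ≤ ·)) :
    ∀ (fuel lo hi : Nat), hi - lo ≤ fuel → lo ≤ splitPt s t → splitPt s t ≤ hi →
      hi ≤ s.length → pvBisectRight s t fuel lo hi = splitPt s t := by
  intro fuel
  induction fuel with
  | zero => intro lo hi hf h1 h2 h3; simp only [pvBisectRight]; omega
  | succ fuel ih =>
    intro lo hi hf h1 h2 h3
    simp only [pvBisectRight]
    split <;> rename_i hlt
    · have hmid : (lo + hi) / 2 < s.length := by omega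
      show (if s.getD ((lo + hi) / 2) 0 ≤ t then pvBisectRight s t fuel ((lo + hi) / 2 + 1) hi
        else pvBisectRight s t fuel lo ((lo + hi) / 2)) = splitPt s t
      rw [List.getD_eq_getElem s 0 hmid]
      have hiff := lt_splitPt_iff s t hs ((lo + hi) / 2) hmid
      split <;> rename_i hc
      · exact ih ((lo + hi) / 2 + 1) hi (by omega) (by have := hiff.mpr hc; omega) h2 h3
      · exact ih lo ((lo + hi) / 2) (by omega)
          h1 (by by_contra hn; exact hc (hiff.mp (by omega))) (by omega)
    · omega

theorem main_fold (s : List Int) (w : Int) (hs : s.Pairwise (· ≤ ·)) :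
    ∀ (b a : Nat) (m : Int) (j : Nat), a + b = s.length →
      (0 < b → j ≤ splitPt s (s.getD a 0 + w)) →
      ((List.range' a b).foldl
        (fun (st : Int × Nat) k =>
          let j' := pvAdvanceA s (s.getD k 0 + w) s.length st.2
          (max st.1 ((j' : Int) - (k : Int)), j')) (m, j)).1
      = (List.range' a b).foldl
        (fun best k =>
          let lo := pvBisectRight s (s.getD k 0 + w) s.length 0 s.length
          if (lo : Int) - (k : Int) > best then (lo : Int) - (k : Int) else best) m := by
  intro b
  induction b with
  | zero => intro a m j _ _; simp
  | succ b ih =>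
    intro a m j hlen hj
    have ha : a < s.length := by omega
    rw [List.range'_succ]
    simp only [List.foldl_cons]
    have hPa := pvAdvanceA_eq s (s.getD a 0 + w) hs s.length j (by omega) (hj (by omega))
    have hB := pvBisectRight_eq s (s.getD a 0 + w) hs s.length 0 s.length (by omega)
      (Nat.zero_le _) (splitPt_le_length _ _) (le_refl _)
    rw [hPa, hB]
    have hm : max m ((splitPt s (s.getD a 0 + w) : Int) - (a : Int))
        = if (splitPt s (s.getD a 0 + w) : Int) - (a : Int) > m
          then (splitPt s (s.getD a 0 + w) : Int) - (a : Int) else m := by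
      rw [max_def]; split <;> split <;> omega
    rw [hm]
    apply ih (a + 1) _ _ (by omega)
    intro hb
    have ha1 : a + 1 < s.length := by omega
    have hmono : s.getD a 0 ≤ s.getD (a + 1) 0 := by
      rw [List.getD_eq_getElem s 0 ha, List.getD_eq_getElem s 0 ha1]
      exact List.pairwise_iff_getElem.mp hs a (a + 1) ha ha1 (by omega)
    exact splitPt_mono s (by omega)

theorem find_max_window_py_eq (starts : List Int) (window : Int) :
    find_max_window_py starts window = find_max_window_py_alt starts window := by
  by_cases hnil : starts = []
  · subst hnil; rfl
  · unfold find_max_window_py find_max_window_py_alt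
    rw [if_neg hnil]
    set s := PySem.List.sorted starts (fun x => x) with hsdef
    have hs : s.Pairwise (· ≤ ·) := PySem.List.sorted_pairwise starts (fun x => x)
    simp only [PySem.List.pyRange_one, zero_add, Int.sub_zero, Int.toNat_natCast,
      List.foldl_map, PySem.List.pyGetD_natCast]
    rw [List.range_eq_range']
    exact main_fold s window hs s.length 0 0 0 (by omega) (fun _ => Nat.zero_le _)

-- ===== VERDICT (by name: the statement is the Claim_ definition above) =====
theorem find_max_window_py_spec : Claim_equal_find_max_window_py := by
  intro starts window _
  exact find_max_window_py_eq starts window
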